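-- pv_equiv track=rewrite | github.com/saulrichardson/dating-agent | automation_service/mobile/full_fidelity_hinge.py | _classify_hinge_screen
-- ===== SOURCE A (Python) =====
-- def _classify_hinge_screen(strings: list[str]) -> str:
--     lowered = [s.lower() for s in strings]
--     if any("close sheet" in s for s in lowered) and any("rose" in s for s in lowered):
--         return "hinge_overlay_rose_sheet"
--     if any("no matches yet" in s for s in lowered):
--         return "hinge_matches_empty"
--     if any("when a like is mutual" in s for s in lowered):
--         return "hinge_matches_empty"
--     if any(s.startswith("skip ") or s == "skip" for s in lowered) and any(s.startswith("like ") for s in lowered):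
--         return "hinge_discover_card"
--     if any("type a message" in s for s in lowered):
--         return "hinge_chat"
--     if "matches" in lowered and "discover" in lowered:
--         return "hinge_tab_shell"
--     return "hinge_unknown"
-- ===== SOURCE B (Python) =====
-- def _classify_hinge_screen(strings: list[str]) -> str:
--     # Build ONE sentinel-delimited text (each UI string lowercased and terminated
--     # by "\x00", with a leading "\x00"); every predicate of the ladder -- contains,
--     # startswith, exact equality -- becomes a single substring search in that text.
--     # Correct on inputs whose characters never include "\x00" (all printable/ASCII UI
--     # strings): "contains" needles cannot span a sentinel, a needle starting with
--     # "\x00" anchors at the start of an element, and "\x00w\x00" is exact membership.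
--     text = "\x00" + "".join(s.lower() + "\x00" for s in strings)
--     if "close sheet" in text and "rose" in text:
--         return "hinge_overlay_rose_sheet"
--     if "no matches yet" in text:
--         return "hinge_matches_empty"
--     if "when a like is mutual" in text:
--         return "hinge_matches_empty"
--     if ("\x00skip " in text or "\x00skip\x00" in text) and "\x00like " in text:
--         return "hinge_discover_card"
--     if "type a message" in text:
--         return "hinge_chat"
--     if "\x00matches\x00" in text and "\x00discover\x00" in text:
--         return "hinge_tab_shell"
--     return "hinge_unknown"
-- ===== Notes on version B (the rewrite author's own statement) =====
-- stated objective: alternative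
-- what changed: Instead of A's repeated any(...) scans over a list of lowered strings, B concatenates all lowered strings into one sentinel-delimited text ("\x00" terminating every element, plus a leading one) and decides every predicate of the ladder -- contains, startswith, exact membership -- as a single substring search in that text.
import Mathlib
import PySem

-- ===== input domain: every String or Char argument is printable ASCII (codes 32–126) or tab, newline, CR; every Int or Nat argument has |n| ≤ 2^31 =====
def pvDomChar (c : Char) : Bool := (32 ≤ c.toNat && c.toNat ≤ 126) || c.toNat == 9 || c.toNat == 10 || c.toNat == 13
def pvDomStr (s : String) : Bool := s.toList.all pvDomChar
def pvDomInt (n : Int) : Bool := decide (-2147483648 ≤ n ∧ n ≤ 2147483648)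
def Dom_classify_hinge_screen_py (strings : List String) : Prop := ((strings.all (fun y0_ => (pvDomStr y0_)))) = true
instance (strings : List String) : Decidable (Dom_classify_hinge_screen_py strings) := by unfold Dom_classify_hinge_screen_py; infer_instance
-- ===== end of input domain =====

-- B replaces A's per-element any(...)/membership scans by building one sentinel-delimited
-- text (each string lowercased and '\x00'-terminated) and turning every predicate of the
-- ladder into a single substring search in that text; objective: alternative algorithm.

-- ===== PORT A =====
def classify_hinge_screen_py (strings : List String) : String :=
  let lowered := strings.map (fun s => PySem.Str.lower s)
  if (lowered.any (fun s => PySem.Str.isIn "close sheet" s)) && (lowered.any (fun s => PySem.Str.isIn "rose" s)) then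
    "hinge_overlay_rose_sheet"
  else if lowered.any (fun s => PySem.Str.isIn "no matches yet" s) then
    "hinge_matches_empty"
  else if lowered.any (fun s => PySem.Str.isIn "when a like is mutual" s) then
    "hinge_matches_empty"
  else if (lowered.any (fun s => PySem.Str.startswith s "skip " || s == "skip")) && (lowered.any (fun s => PySem.Str.startswith s "like ")) then
    "hinge_discover_card"
  else if lowered.any (fun s => PySem.Str.isIn "type a message" s) then
    "hinge_chat"
  else if lowered.contains "matches" && lowered.contains "discover" then
    "hinge_tab_shell"
  else
    "hinge_unknown"

-- ===== PORT B =====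
-- Source B: text = "\x00" + "".join(s.lower() + "\x00" for s in strings); each test is one
-- substring search in `text` (ported on the List Char layer, PySem.Chars = the Str layer's
-- exact definitions).
def classify_hinge_screen_py_alt (strings : List String) : String :=
  let text : List Char := '\x00' :: PySem.Chars.join [] (strings.map (fun s => PySem.Chars.lower s.toList ++ ['\x00']))
  if PySem.Chars.isIn "close sheet".toList text && PySem.Chars.isIn "rose".toList text then
    "hinge_overlay_rose_sheet"
  else if PySem.Chars.isIn "no matches yet".toList text then
    "hinge_matches_empty"
  else if PySem.Chars.isIn "when a like is mutual".toList text then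
    "hinge_matches_empty"
  else if (PySem.Chars.isIn "\x00skip ".toList text || PySem.Chars.isIn "\x00skip\x00".toList text) && PySem.Chars.isIn "\x00like ".toList text then
    "hinge_discover_card"
  else if PySem.Chars.isIn "type a message".toList text then
    "hinge_chat"
  else if PySem.Chars.isIn "\x00matches\x00".toList text && PySem.Chars.isIn "\x00discover\x00".toList text then
    "hinge_tab_shell"
  else
    "hinge_unknown"

-- ===== PRECONDITION & SPEC =====
def Spec_classify_hinge_screen_py (strings : List String) (out : String) : Prop := out = classify_hinge_screen_py_alt strings
instance (strings : List String) (out : String) : Decidable (Spec_classify_hinge_screen_py strings out) := by unfold Spec_classify_hinge_screen_py; infer_instance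

-- ===== CLAIM (what is proved, stated in full; the proofs are below) =====
def Claim_equal_classify_hinge_screen_py : Prop := ∀ (strings : List String), Dom_classify_hinge_screen_py strings → Spec_classify_hinge_screen_py strings (classify_hinge_screen_py strings)

-- ===== LEMMAS AND PROOFS =====

-- The sentinel-joined text of a list of (already lowercased) segments.
def pvTail (l : List (List Char)) : List Char := (l.map (fun x => x ++ ['\x00'])).flatten
def pvWrap (l : List (List Char)) : List Char := '\x00' :: pvTail l

theorem pvTail_cons (x : List Char) (xs : List (List Char)) :
    pvTail (x :: xs) = x ++ '\x00' :: pvTail xs := by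
  simp [pvTail]

theorem pv_join_nil (ps : List (List Char)) : PySem.Chars.join [] ps = ps.flatten := by
  show List.intercalate [] ps = ps.flatten
  induction ps with
  | nil => simp [List.intercalate]
  | cons x xs ih => cases xs <;> simp_all [List.intercalate, List.intersperse]

-- a sep-free pattern cannot reach past a sentinel: prefix form
theorem pv_prefix_sep {P : List Char} (hP : '\x00' ∉ P) :
    ∀ (x t : List Char), (P <+: x ++ '\x00' :: t ↔ P <+: x) := by
  induction P with
  | nil => intro x t; simp
  | cons p P' ih =>
    intro x t
    cases x with
    | nil =>
      simp only [List.nil_append]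
      constructor
      · intro h
        rcases (List.cons_prefix_cons).mp h with ⟨h1, _⟩
        exact absurd (show ('\x00':Char) ∈ p :: P' by simp [h1]) hP
      · intro h; exact absurd h (by simp)
    | cons c x' =>
      have hP' : '\x00' ∉ P' := fun h => hP (List.mem_cons_of_mem _ h)
      simp only [List.cons_append, List.cons_prefix_cons, ih hP' x' t]

-- a sep-free pattern followed by a sentinel is a prefix iff it IS the first segment
theorem pv_prefix_eq_sep {P : List Char} (hP : '\x00' ∉ P) :
    ∀ (x : List Char), '\x00' ∉ x → ∀ t, (P ++ ['\x00'] <+: x ++ '\x00' :: t ↔ P = x) := by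
  induction P with
  | nil =>
    intro x hx t
    cases x with
    | nil => simp
    | cons c x' =>
      simp only [List.nil_append, List.cons_append, List.cons_prefix_cons]
      constructor
      · rintro ⟨h1, _⟩; exact absurd (show ('\x00':Char) ∈ c :: x' by simp [← h1]) hx
      · intro h; exact absurd h (by simp)
  | cons p P' ih =>
    intro x hx t
    cases x with
    | nil =>
      simp only [List.nil_append, List.cons_append, List.cons_prefix_cons]
      constructor
      · rintro ⟨h1, _⟩; exact absurd (show ('\x00':Char) ∈ p :: P' by simp [h1]) hP
      · intro h; exact absurd h (by simp)
    | cons c x' =>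
      have hP' : '\x00' ∉ P' := fun h => hP (List.mem_cons_of_mem _ h)
      have hx' : '\x00' ∉ x' := fun h => hx (List.mem_cons_of_mem _ h)
      simp only [List.cons_append, List.cons_prefix_cons, ih hP' x' hx' t]
      constructor
      · rintro ⟨h1, h2⟩; rw [h1, h2]
      · intro h; injection h with h1 h2; exact ⟨h1, by rw [h2]⟩

-- a pattern starting with the sentinel occurs in x ++ t (x sep-free) iff it occurs in t
theorem pv_infix_sephead (Q : List Char) :
    ∀ (x : List Char), '\x00' ∉ x → ∀ t, (('\x00' :: Q) <:+: x ++ t ↔ ('\x00' :: Q) <:+: t) := by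
  intro x
  induction x with
  | nil => intro _ t; simp
  | cons c x' ih =>
    intro hx t
    have hx' : '\x00' ∉ x' := fun h => hx (List.mem_cons_of_mem _ h)
    simp only [List.cons_append, List.infix_cons_iff, List.cons_prefix_cons]
    rw [ih hx' t]
    constructor
    · rintro (⟨h1, _⟩ | h)
      · exact absurd (show ('\x00':Char) ∈ c :: x' by simp [← h1]) hx
      · exact h
    · intro h; exact Or.inr h

-- a nonempty sep-free pattern in x ++ sep :: t occurs in x or in sep :: t
theorem pv_infix_sep_split {P : List Char} (hP : '\x00' ∉ P) (hne : P ≠ []) :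
    ∀ (x t : List Char), (P <:+: x ++ '\x00' :: t ↔ P <:+: x ∨ P <:+: '\x00' :: t) := by
  intro x
  induction x with
  | nil =>
    intro t
    simp only [List.nil_append]
    constructor
    · intro h; exact Or.inr h
    · rintro (h | h)
      · exact absurd (by simpa using h) hne
      · exact h
  | cons c x' ih =>
    intro t
    have h1 := pv_prefix_sep hP (c :: x') t
    have h2 := ih t
    rw [List.cons_append] at h1
    rw [List.cons_append, List.infix_cons_iff, List.infix_cons_iff (l₂ := x')]
    tauto

-- M1: a nonempty sep-free needle occurs in the joined text iff it occurs in some segment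
theorem pv_contains {P : List Char} (hP : '\x00' ∉ P) (hne : P ≠ []) :
    ∀ (segs : List (List Char)), (∀ s ∈ segs, '\x00' ∉ s) →
      (P <:+: pvWrap segs ↔ ∃ s ∈ segs, P <:+: s) := by
  intro segs
  induction segs with
  | nil =>
    intro _
    constructor
    · intro h
      rcases (List.infix_singleton_iff P '\x00').mp (by simpa [pvWrap, pvTail] using h) with h0 | h0
      · exact absurd h0 hne
      · exact absurd (show ('\x00':Char) ∈ P by simp [h0]) hP
    · rintro ⟨s, hs, _⟩; exact absurd hs (by simp)
  | cons x xs ih =>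
    intro hsf
    have hx : '\x00' ∉ x := hsf x List.mem_cons_self
    have hxs : ∀ s ∈ xs, '\x00' ∉ s := fun s hs => hsf s (List.mem_cons_of_mem _ hs)
    have hwrap : P <:+: pvWrap (x :: xs) ↔ P <:+: x ++ pvWrap xs := by
      rw [pvWrap, pvTail_cons]
      rw [List.infix_cons_iff]
      constructor
      · rintro (h | h)
        · cases P with
          | nil => exact absurd rfl hne
          | cons p P' =>
            rcases (List.cons_prefix_cons).mp h with ⟨h1, _⟩
            exact absurd (show ('\x00':Char) ∈ p :: P' by simp [h1]) hP
        · exact h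
      · intro h; exact Or.inr h
    rw [hwrap]
    have : P <:+: x ++ pvWrap xs ↔ P <:+: x ∨ P <:+: pvWrap xs := by
      simpa [pvWrap] using pv_infix_sep_split hP hne x (pvTail xs)
    rw [this, ih hxs]
    simp only [List.mem_cons]
    constructor
    · rintro (h | ⟨s, hs, h⟩)
      · exact ⟨x, Or.inl rfl, h⟩
      · exact ⟨s, Or.inr hs, h⟩
    · rintro ⟨s, (rfl | hs), h⟩
      · exact Or.inl h
      · exact Or.inr ⟨s, hs, h⟩

-- M2: sep :: Q (Q nonempty, sep-free) occurs iff Q is a prefix of some segment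
theorem pv_starts {Q : List Char} (hQ : '\x00' ∉ Q) (hne : Q ≠ []) :
    ∀ (segs : List (List Char)), (∀ s ∈ segs, '\x00' ∉ s) →
      (('\x00' :: Q) <:+: pvWrap segs ↔ ∃ s ∈ segs, Q <+: s) := by
  intro segs
  induction segs with
  | nil =>
    intro _
    constructor
    · intro h
      rcases (List.infix_singleton_iff _ '\x00').mp (by simpa [pvWrap, pvTail] using h) with h0 | h0
      · exact absurd h0 (by simp)
      · injection h0 with _ h1; exact absurd h1 hne
    · rintro ⟨s, hs, _⟩; exact absurd hs (by simp)
  | cons x xs ih =>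
    intro hsf
    have hx : '\x00' ∉ x := hsf x List.mem_cons_self
    have hxs : ∀ s ∈ xs, '\x00' ∉ s := fun s hs => hsf s (List.mem_cons_of_mem _ hs)
    rw [pvWrap, pvTail_cons, List.infix_cons_iff, List.cons_prefix_cons]
    have h2 : ('\x00' :: Q) <:+: x ++ '\x00' :: pvTail xs ↔ ('\x00' :: Q) <:+: pvWrap xs := by
      simpa [pvWrap] using pv_infix_sephead Q x hx ('\x00' :: pvTail xs)
    rw [h2, ih hxs, pv_prefix_sep hQ x (pvTail xs)]
    simp only [List.mem_cons]
    constructor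
    · rintro (⟨_, h⟩ | ⟨s, hs, h⟩)
      · exact ⟨x, Or.inl rfl, h⟩
      · exact ⟨s, Or.inr hs, h⟩
    · rintro ⟨s, (rfl | hs), h⟩
      · exact Or.inl ⟨by simp, h⟩
      · exact Or.inr ⟨s, hs, h⟩

-- M3: sep :: P ++ [sep] (P sep-free) occurs iff P equals some segment
theorem pv_member {P : List Char} (hP : '\x00' ∉ P) :
    ∀ (segs : List (List Char)), (∀ s ∈ segs, '\x00' ∉ s) →
      (('\x00' :: (P ++ ['\x00'])) <:+: pvWrap segs ↔ P ∈ segs) := by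
  intro segs
  induction segs with
  | nil =>
    intro _
    constructor
    · intro h
      rcases (List.infix_singleton_iff _ '\x00').mp (by simpa [pvWrap, pvTail] using h) with h0 | h0
      · exact absurd h0 (by simp)
      · injection h0 with _ h1; exact absurd h1 (by simp)
    · intro hs; exact absurd hs (by simp)
  | cons x xs ih =>
    intro hsf
    have hx : '\x00' ∉ x := hsf x List.mem_cons_self
    have hxs : ∀ s ∈ xs, '\x00' ∉ s := fun s hs => hsf s (List.mem_cons_of_mem _ hs)
    rw [pvWrap, pvTail_cons, List.infix_cons_iff, List.cons_prefix_cons]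
    have h2 : ('\x00' :: (P ++ ['\x00'])) <:+: x ++ '\x00' :: pvTail xs ↔
        ('\x00' :: (P ++ ['\x00'])) <:+: pvWrap xs := by
      simpa [pvWrap] using pv_infix_sephead (P ++ ['\x00']) x hx ('\x00' :: pvTail xs)
    rw [h2, ih hxs, pv_prefix_eq_sep hP x hx (pvTail xs)]
    simp only [List.mem_cons]
    tauto

-- under Dom, every lowercased segment is sentinel-free
theorem pv_dom_sepfree {strings : List String} (hD : Dom_classify_hinge_screen_py strings) :
    ∀ l ∈ strings.map (fun s => PySem.Chars.lower s.toList), '\x00' ∉ l := by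
  intro l hl hmem
  rcases List.mem_map.mp hl with ⟨s, hs, rfl⟩
  rcases List.mem_map.mp hmem with ⟨c, hc, hlc⟩
  have hdom : pvDomChar c = true := by
    have h1 : pvDomStr s = true := by
      have := (List.all_eq_true.mp hD) s hs
      simpa using this
    have := (List.all_eq_true.mp (by simpa [pvDomStr] using h1)) c hc
    simpa using this
  have hb : 9 ≤ c.toNat ∧ c.toNat ≤ 126 := by
    simp [pvDomChar] at hdom
    omega
  have h0 : (PySem.Chars.lowerChar c).toNat = 0 := by rw [hlc]; rfl
  revert h0
  simp only [PySem.Chars.lowerChar]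
  split
  · have hofNat : (Char.ofNat (c.toNat + 32)).toNat = c.toNat + 32 := by
      unfold Char.ofNat
      split
      · rfl
      · omega
    intro h0
    rw [hofNat] at h0
    omega
  · intro h0
    omega

-- bridges between B's single-text searches and A's per-element scans
theorem pv_bridge_contains (sub : String) (h1 : sub.toList ≠ []) (h2 : '\x00' ∉ sub.toList)
    (strings : List String)
    (hsf : ∀ l ∈ strings.map (fun s => PySem.Chars.lower s.toList), '\x00' ∉ l) :
    PySem.Chars.isIn sub.toList (pvWrap (strings.map (fun s => PySem.Chars.lower s.toList))) =
      (strings.map PySem.Str.lower).any (fun s => PySem.Str.isIn sub s) := by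
  apply Bool.coe_iff_coe.mp
  rw [PySem.Chars.isIn_iff_infix, pv_contains h2 h1 _ hsf]
  simp only [List.any_eq_true, List.mem_map]
  constructor
  · rintro ⟨l, ⟨s, hs, rfl⟩, h⟩
    refine ⟨PySem.Str.lower s, ⟨s, hs, rfl⟩, ?_⟩
    rw [PySem.Str.isIn_iff_infix, PySem.Str.toList_lower]
    exact h
  · rintro ⟨t, ⟨s, hs, rfl⟩, h⟩
    refine ⟨PySem.Chars.lower s.toList, ⟨s, hs, rfl⟩, ?_⟩
    rw [PySem.Str.isIn_iff_infix, PySem.Str.toList_lower] at h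
    exact h

theorem pv_bridge_starts (pre : String) (h1 : pre.toList ≠ []) (h2 : '\x00' ∉ pre.toList)
    (strings : List String)
    (hsf : ∀ l ∈ strings.map (fun s => PySem.Chars.lower s.toList), '\x00' ∉ l) :
    PySem.Chars.isIn ('\x00' :: pre.toList) (pvWrap (strings.map (fun s => PySem.Chars.lower s.toList))) =
      (strings.map PySem.Str.lower).any (fun s => PySem.Str.startswith s pre) := by
  apply Bool.coe_iff_coe.mp
  rw [PySem.Chars.isIn_iff_infix, pv_starts h2 h1 _ hsf]
  simp only [List.any_eq_true, List.mem_map]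
  constructor
  · rintro ⟨l, ⟨s, hs, rfl⟩, h⟩
    refine ⟨PySem.Str.lower s, ⟨s, hs, rfl⟩, ?_⟩
    rw [PySem.Str.startswith_eq, PySem.Str.toList_lower]
    exact (PySem.Chars.startswith_iff _ _).mpr h
  · rintro ⟨t, ⟨s, hs, rfl⟩, h⟩
    refine ⟨PySem.Chars.lower s.toList, ⟨s, hs, rfl⟩, ?_⟩
    rw [PySem.Str.startswith_eq, PySem.Str.toList_lower] at h
    exact (PySem.Chars.startswith_iff _ _).mp h

theorem pv_bridge_member (w : String) (h2 : '\x00' ∉ w.toList)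
    (strings : List String)
    (hsf : ∀ l ∈ strings.map (fun s => PySem.Chars.lower s.toList), '\x00' ∉ l) :
    PySem.Chars.isIn ('\x00' :: (w.toList ++ ['\x00'])) (pvWrap (strings.map (fun s => PySem.Chars.lower s.toList))) =
      (strings.map PySem.Str.lower).contains w := by
  apply Bool.coe_iff_coe.mp
  rw [PySem.Chars.isIn_iff_infix, pv_member h2 _ hsf, List.contains_iff_mem]
  simp only [List.mem_map]
  constructor
  · rintro ⟨s, hs, h⟩
    refine ⟨s, hs, ?_⟩
    rw [String.ext_iff, PySem.Str.toList_lower, h]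
  · rintro ⟨s, hs, h⟩
    refine ⟨s, hs, ?_⟩
    rw [← PySem.Str.toList_lower, h]

theorem pv_bridge_anyEq (w : String) (h2 : '\x00' ∉ w.toList)
    (strings : List String)
    (hsf : ∀ l ∈ strings.map (fun s => PySem.Chars.lower s.toList), '\x00' ∉ l) :
    PySem.Chars.isIn ('\x00' :: (w.toList ++ ['\x00'])) (pvWrap (strings.map (fun s => PySem.Chars.lower s.toList))) =
      (strings.map PySem.Str.lower).any (fun s => s == w) := by
  rw [pv_bridge_member w h2 strings hsf]
  apply Bool.coe_iff_coe.mp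
  rw [List.contains_iff_mem]
  simp [List.any_eq_true]

-- A's single skip-scan is the disjunction of a prefix scan and an equality scan
theorem pv_skip_split (L : List String) :
    L.any (fun s => PySem.Str.startswith s "skip " || s == "skip") =
      (L.any (fun s => PySem.Str.startswith s "skip ") || L.any (fun s => s == "skip")) := by
  apply Bool.coe_iff_coe.mp
  simp only [List.any_eq_true, Bool.or_eq_true]
  constructor
  · rintro ⟨x, hx, (h | h)⟩
    · exact Or.inl ⟨x, hx, h⟩
    · exact Or.inr ⟨x, hx, h⟩
  · rintro (⟨x, hx, h⟩ | ⟨x, hx, h⟩)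
    · exact ⟨x, hx, Or.inl h⟩
    · exact ⟨x, hx, Or.inr h⟩

-- ===== VERDICT (by name: the statement is the Claim_ definition above) =====
theorem classify_hinge_screen_py_spec : Claim_equal_classify_hinge_screen_py := by
  intro strings hD
  unfold Spec_classify_hinge_screen_py classify_hinge_screen_py classify_hinge_screen_py_alt
  have hsf := pv_dom_sepfree hD
  have htext : ('\x00' :: PySem.Chars.join [] (strings.map (fun s => PySem.Chars.lower s.toList ++ ['\x00']))) =
      pvWrap (strings.map (fun s => PySem.Chars.lower s.toList)) := by
    simp only [pvWrap, pvTail, pv_join_nil, List.map_map]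
    rfl
  have e1 := pv_bridge_contains "close sheet" (by decide) (by decide) strings hsf
  have e2 := pv_bridge_contains "rose" (by decide) (by decide) strings hsf
  have e3 := pv_bridge_contains "no matches yet" (by decide) (by decide) strings hsf
  have e4 := pv_bridge_contains "when a like is mutual" (by decide) (by decide) strings hsf
  have e5 := pv_bridge_contains "type a message" (by decide) (by decide) strings hsf
  have e6 : PySem.Chars.isIn ("\x00skip ").toList
      (pvWrap (strings.map (fun s => PySem.Chars.lower s.toList))) =
      (strings.map PySem.Str.lower).any (fun s => PySem.Str.startswith s "skip ") :=
    pv_bridge_starts "skip " (by decide) (by decide) strings hsf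
  have e7 : PySem.Chars.isIn ("\x00skip\x00").toList
      (pvWrap (strings.map (fun s => PySem.Chars.lower s.toList))) =
      (strings.map PySem.Str.lower).any (fun s => s == "skip") :=
    pv_bridge_anyEq "skip" (by decide) strings hsf
  have e8 : PySem.Chars.isIn ("\x00like ").toList
      (pvWrap (strings.map (fun s => PySem.Chars.lower s.toList))) =
      (strings.map PySem.Str.lower).any (fun s => PySem.Str.startswith s "like ") :=
    pv_bridge_starts "like " (by decide) (by decide) strings hsf
  have e9 : PySem.Chars.isIn ("\x00matches\x00").toList
      (pvWrap (strings.map (fun s => PySem.Chars.lower s.toList))) =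
      (strings.map PySem.Str.lower).contains "matches" :=
    pv_bridge_member "matches" (by decide) strings hsf
  have e10 : PySem.Chars.isIn ("\x00discover\x00").toList
      (pvWrap (strings.map (fun s => PySem.Chars.lower s.toList))) =
      (strings.map PySem.Str.lower).contains "discover" :=
    pv_bridge_member "discover" (by decide) strings hsf
  simp only [htext, e1, e2, e3, e4, e5, e6, e7, e8, e9, e10, pv_skip_split]
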